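-- pv_equiv track=rewrite | github.com/AnonyRepo2025/RE2-Bench | analysis/overlap_constructs.py | count_constructs
-- ===== SOURCE A (Python) =====
-- def count_constructs(problems_ids, constructs):
--     constructs_included = []
--     for i in problems_ids:
--         if i not in constructs: continue
--         for k in constructs[i]:
--             if constructs[i][k]:
--                 if k not in constructs_included:
--                     constructs_included.append(k)
--     return constructs_included
-- ===== SOURCE B (Python) =====
-- def count_constructs(problems_ids, constructs):
--     # Pass 1: the flat stream of all truthy construct keys, duplicates included.
--     flat = [k
--             for i in problems_ids
--             if i in constructs
--             for k, v in constructs[i].items()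
--             if v]
--     # Pass 2: stateless positional filter — keep a key exactly at its first position.
--     return [k for j, k in enumerate(flat) if flat.index(k) == j]
-- ===== Notes on version B (the rewrite author's own statement) =====
-- stated objective: alternative
-- what changed: Replaces A's interleaved append-if-not-seen accumulator with two separate passes: a flat comprehension collecting every truthy key (duplicates kept), then a stateless positional filter that keeps a key at position j exactly when flat.index(k) == j, so no seen-list is maintained at all.
import Mathlib
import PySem

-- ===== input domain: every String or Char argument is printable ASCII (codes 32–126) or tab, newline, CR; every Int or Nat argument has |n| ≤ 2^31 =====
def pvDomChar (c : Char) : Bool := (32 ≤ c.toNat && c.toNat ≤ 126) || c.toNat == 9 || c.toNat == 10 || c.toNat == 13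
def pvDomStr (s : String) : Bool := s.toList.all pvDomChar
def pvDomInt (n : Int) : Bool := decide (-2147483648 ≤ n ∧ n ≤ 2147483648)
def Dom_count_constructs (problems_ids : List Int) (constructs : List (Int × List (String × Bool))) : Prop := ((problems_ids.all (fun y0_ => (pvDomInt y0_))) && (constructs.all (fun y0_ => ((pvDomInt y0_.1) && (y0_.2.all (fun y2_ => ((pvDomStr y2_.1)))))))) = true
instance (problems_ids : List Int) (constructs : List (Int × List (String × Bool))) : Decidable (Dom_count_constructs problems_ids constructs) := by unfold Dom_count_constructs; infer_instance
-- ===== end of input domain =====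

-- B replaces the interleaved append-if-not-seen accumulator with a flat collection pass
-- followed by a stateless positional filter (keep k at position j iff flat.index(k) == j).

-- ===== PORT A =====
-- A: for each problem id, if it is a key of constructs, walk the inner dict's keys and
-- append each truthy key not yet collected.
def count_constructs (problems_ids : List Int) (constructs : List (Int × List (String × Bool))) : List String :=
  let d := PySem.Dict.ofList (constructs.map (fun p => (p.1, PySem.Dict.ofList p.2)))
  problems_ids.foldl (fun acc i =>
    match d.get? i with
    | none => acc                       -- `if i not in constructs: continue`
    | some inner =>
        inner.keys.foldl (fun acc2 k => -- `for k in constructs[i]`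
          if inner.getD k false then    -- `if constructs[i][k]`
            if k ∈ acc2 then acc2 else acc2 ++ [k]
          else acc2) acc) []

-- ===== PORT B =====
-- B: flat comprehension of all truthy keys with duplicates, then
-- `[k for j, k in enumerate(flat) if flat.index(k) == j]`.
def count_constructs_alt (problems_ids : List Int) (constructs : List (Int × List (String × Bool))) : List String :=
  let d := PySem.Dict.ofList (constructs.map (fun p => (p.1, PySem.Dict.ofList p.2)))
  let flat := problems_ids.flatMap (fun i =>
    match d.get? i with
    | none => []
    | some inner => inner.items.filterMap (fun kv => if kv.2 then some kv.1 else none))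
  (PySem.List.enumerate flat).filterMap (fun jk =>
    if (PySem.List.index? flat jk.2).map (fun n : Nat => (n : Int)) = some jk.1 then some jk.2 else none)

-- ===== PRECONDITION & SPEC =====
def Spec_count_constructs (problems_ids : List Int) (constructs : List (Int × List (String × Bool))) (out : List String) : Prop := out = count_constructs_alt problems_ids constructs
instance (problems_ids : List Int) (constructs : List (Int × List (String × Bool))) (out : List String) : Decidable (Spec_count_constructs problems_ids constructs out) := by unfold Spec_count_constructs; infer_instance

-- ===== CLAIM (what is proved, stated in full; the proofs are below) =====
def Claim_equal_count_constructs : Prop := ∀ (problems_ids : List Int) (constructs : List (Int × List (String × Bool))), Dom_count_constructs problems_ids constructs → Spec_count_constructs problems_ids constructs (count_constructs problems_ids constructs)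

-- ===== LEMMAS AND PROOFS =====

-- B's positional filter, with the enumeration started at an arbitrary offset s.
def firstOcc (l : List String) (s : Int) : List String :=
  (PySem.List.enumerate l s).filterMap (fun jk =>
    if (PySem.List.index? l jk.2).map (fun n : Nat => s + (n : Int)) = some jk.1 then some jk.2 else none)

-- Tail of the positional filter: looking keys up in x :: w with offset s over a suffix
-- enumerated from m > s equals looking them up in w with offset s + 1, minus the x's.
theorem firstOcc_tail (x : String) (w : List String) (s : Int) (u : List String) :
    ∀ m : Int, s < m →
    (PySem.List.enumerate u m).filterMap (fun jk =>
        if (PySem.List.index? (x :: w) jk.2).map (fun n : Nat => s + (n : Int)) = some jk.1 then some jk.2 else none)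
    = ((PySem.List.enumerate u m).filterMap (fun jk =>
        if (PySem.List.index? w jk.2).map (fun n : Nat => s + 1 + (n : Int)) = some jk.1 then some jk.2 else none)).filter
        (fun y => decide (y ≠ x)) := by
  induction u with
  | nil => intro m _; simp [PySem.List.enumerate_nil]
  | cons k t ih =>
      intro m hm
      rw [PySem.List.enumerate_cons]
      by_cases hk : k = x
      · subst hk
        have hA : (if (PySem.List.index? (k :: w) k).map (fun n : Nat => s + (n : Int)) = some m then some k else none) = none := by
          refine if_neg (fun h => ?_)
          rw [PySem.List.index?_cons_self] at h
          simp at h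
          omega
        rw [List.filterMap_cons_none (f := fun jk : Int × String => if (PySem.List.index? (k :: w) jk.2).map (fun n : Nat => s + (n : Int)) = some jk.1 then some jk.2 else none) hA]
        by_cases hc : (PySem.List.index? w k).map (fun n : Nat => s + 1 + (n : Int)) = some m
        · rw [List.filterMap_cons_some (f := fun jk : Int × String => if (PySem.List.index? w jk.2).map (fun n : Nat => s + 1 + (n : Int)) = some jk.1 then some jk.2 else none) (if_pos hc)]
          rw [List.filter_cons_of_neg (by simp)]
          exact ih (m + 1) (by omega)
        · rw [List.filterMap_cons_none (f := fun jk : Int × String => if (PySem.List.index? w jk.2).map (fun n : Nat => s + 1 + (n : Int)) = some jk.1 then some jk.2 else none) (if_neg hc)]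
          exact ih (m + 1) (by omega)
      · have hmap : (PySem.List.index? (x :: w) k).map (fun n : Nat => s + (n : Int))
            = (PySem.List.index? w k).map (fun n : Nat => s + 1 + (n : Int)) := by
          rw [PySem.List.index?_cons_of_ne w (Ne.symm hk), Option.map_map]
          apply Option.map_congr
          intro n _
          simp only [Function.comp_apply]
          push_cast
          ring
        by_cases hc : (PySem.List.index? w k).map (fun n : Nat => s + 1 + (n : Int)) = some m
        · rw [List.filterMap_cons_some (f := fun jk : Int × String => if (PySem.List.index? (x :: w) jk.2).map (fun n : Nat => s + (n : Int)) = some jk.1 then some jk.2 else none) (if_pos (hmap.trans hc)),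
             List.filterMap_cons_some (f := fun jk : Int × String => if (PySem.List.index? w jk.2).map (fun n : Nat => s + 1 + (n : Int)) = some jk.1 then some jk.2 else none) (if_pos hc)]
          rw [List.filter_cons_of_pos (by simp [hk])]
          rw [ih (m + 1) (by omega)]
        · rw [List.filterMap_cons_none (f := fun jk : Int × String => if (PySem.List.index? (x :: w) jk.2).map (fun n : Nat => s + (n : Int)) = some jk.1 then some jk.2 else none) (if_neg (fun h => hc (hmap.symm.trans h))),
             List.filterMap_cons_none (f := fun jk : Int × String => if (PySem.List.index? w jk.2).map (fun n : Nat => s + 1 + (n : Int)) = some jk.1 then some jk.2 else none) (if_neg hc)]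
          exact ih (m + 1) (by omega)

theorem firstOcc_cons (x : String) (t : List String) (s : Int) :
    firstOcc (x :: t) s = x :: (firstOcc t (s + 1)).filter (fun y => decide (y ≠ x)) := by
  unfold firstOcc
  rw [PySem.List.enumerate_cons]
  have hA : (if (PySem.List.index? (x :: t) x).map (fun n : Nat => s + (n : Int)) = some s then some x else none) = some x := by
    refine if_pos ?_
    rw [PySem.List.index?_cons_self]
    simp
  rw [List.filterMap_cons_some (f := fun jk : Int × String => if (PySem.List.index? (x :: t) jk.2).map (fun n : Nat => s + (n : Int)) = some jk.1 then some jk.2 else none) hA]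
  rw [firstOcc_tail x t s t (s + 1) (by omega)]

theorem firstOcc_start (l : List String) : ∀ s s' : Int, firstOcc l s = firstOcc l s' := by
  induction l with
  | nil => intro s s'; simp [firstOcc]
  | cons x t ih =>
      intro s s'
      rw [firstOcc_cons, firstOcc_cons, ih (s + 1) (s' + 1)]

-- A's append-if-not-seen fold over a flat stream of keys is the positional filter,
-- restricted to keys not already in the accumulator.
theorem seen_foldl_eq (l : List String) :
    ∀ acc : List String,
    l.foldl (fun acc2 k => if k ∈ acc2 then acc2 else acc2 ++ [k]) acc
      = acc ++ (firstOcc l 0).filter (fun y => decide (y ∉ acc)) := by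
  induction l with
  | nil => intro acc; simp [firstOcc]
  | cons x t ih =>
      intro acc
      rw [List.foldl_cons, firstOcc_cons, firstOcc_start t (0 + 1) 0]
      by_cases hx : x ∈ acc
      · rw [if_pos hx, ih acc]
        simp only [List.filter_cons, show (decide (x ∉ acc)) = false by simp [hx]]
        congr 1
        rw [List.filter_filter]
        apply List.filter_congr
        intro a _
        by_cases ha : a ∈ acc
        · simp [ha]
        · simp [ha]
          exact fun h : a = x => ha (h ▸ hx)
      · rw [if_neg hx, ih (acc ++ [x])]
        simp only [List.filter_cons, show (decide (x ∉ acc)) = true by simp [hx]]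
        rw [List.append_assoc]
        congr 1
        rw [List.singleton_append]
        congr 1
        rw [List.filter_filter]
        apply List.filter_congr
        intro a _
        by_cases ha : a ∈ acc
        · simp [ha, List.mem_append]
        · by_cases hax : a = x
          · simp [hax, List.mem_append]
          · simp [ha, hax, List.mem_append]

-- Every value stored in the ports' shared dict has duplicate-free keys.
theorem values_foldl_insert_prop {κ ν : Type} [BEq κ] [LawfulBEq κ] (P : ν → Prop) (l : List (κ × ν))
    (d0 : PySem.Dict κ ν) (h0 : ∀ v ∈ d0.values, P v) (hp : ∀ p ∈ l, P p.2) :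
    ∀ v ∈ (l.foldl (fun d p => d.insert p.1 p.2) d0).values, P v := by
  induction l generalizing d0 with
  | nil => exact h0
  | cons q t ih =>
      simp only [List.foldl_cons]
      refine ih _ (fun v hv => ?_) (fun p hp' => hp p (List.mem_cons_of_mem _ hp'))
      rcases PySem.Dict.mem_values_insert d0 q.1 q.2 v hv with h | h
      · exact h ▸ hp q (List.mem_cons_self)
      · exact h0 v h

-- Inner loop: iterating the keys and looking each one up equals folding the items filtered to truthy keys.
theorem inner_loop_eq (inner : PySem.Dict String Bool) (hnd : inner.keys.Nodup) (acc : List String) :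
    inner.keys.foldl (fun acc2 k =>
        if inner.getD k false then
          if k ∈ acc2 then acc2 else acc2 ++ [k]
        else acc2) acc
      = (inner.items.filterMap (fun kv => if kv.2 then some kv.1 else none)).foldl
          (fun acc2 k => if k ∈ acc2 then acc2 else acc2 ++ [k]) acc := by
  have hget : ∀ kv ∈ inner.items, inner.getD kv.1 false = kv.2 := by
    intro kv hkv
    exact PySem.Dict.getD_of_mem_items inner (by simpa using hkv) hnd false
  have keys_def : inner.keys = inner.items.map (·.1) := rfl
  rw [keys_def]
  generalize hl : inner.items = l at hget
  clear hl hnd keys_def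
  induction l generalizing acc with
  | nil => rfl
  | cons kv t ih =>
      simp only [List.map_cons, List.foldl_cons, List.filterMap_cons]
      rw [hget kv (List.mem_cons_self)]
      cases hb : kv.2 with
      | true =>
          exact ih _ (fun x hx => hget x (List.mem_cons_of_mem _ hx))
      | false =>
          simp only [Bool.false_eq_true, if_false]
          exact ih _ (fun x hx => hget x (List.mem_cons_of_mem _ hx))

-- Nested fold over per-id chunks equals a single fold over the flattened stream.
theorem foldl_flatMap_eq {α β γ : Type} (l : List α) (g : α → List β)
    (f : γ → β → γ) (init : γ) :
    l.foldl (fun acc i => (g i).foldl f acc) init = (l.flatMap g).foldl f init := by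
  induction l generalizing init with
  | nil => rfl
  | cons a t ih => simp [List.flatMap_cons, List.foldl_append, ih]

theorem count_constructs_eq_alt (problems_ids : List Int) (constructs : List (Int × List (String × Bool))) :
    count_constructs problems_ids constructs = count_constructs_alt problems_ids constructs := by
  unfold count_constructs count_constructs_alt
  set d := PySem.Dict.ofList (constructs.map (fun p => (p.1, PySem.Dict.ofList p.2))) with hd
  have h1 : problems_ids.foldl (fun acc i =>
      match d.get? i with
      | none => acc
      | some inner =>
          inner.keys.foldl (fun acc2 k =>
            if inner.getD k false then
              if k ∈ acc2 then acc2 else acc2 ++ [k]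
            else acc2) acc) []
      = problems_ids.foldl (fun acc i =>
          (match d.get? i with
           | none => []
           | some inner => inner.items.filterMap (fun kv : String × Bool => if kv.2 then some kv.1 else none)).foldl
            (fun acc2 k => if k ∈ acc2 then acc2 else acc2 ++ [k]) acc) [] := by
    apply PySem.List.foldl_congr_mem
    intro acc i _
    have hvals : ∀ v ∈ d.values, v.keys.Nodup := by
      rw [hd]
      exact values_foldl_insert_prop (fun v : PySem.Dict String Bool => v.keys.Nodup) _ PySem.Dict.empty
        (by intro v hv; simp [PySem.Dict.values, PySem.Dict.empty] at hv)
        (by intro p hp; simp only [List.mem_map] at hp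
            obtain ⟨q, _, rfl⟩ := hp; exact PySem.Dict.nodup_keys_ofList q.2)
    cases h : d.get? i with
    | none => rfl
    | some inner =>
        have hmem : (i, inner) ∈ d.items := PySem.Dict.mem_items_of_get?_eq_some d h
        have : inner ∈ d.values := by
          simp only [PySem.Dict.values]; exact List.mem_map.mpr ⟨(i, inner), hmem, rfl⟩
        exact inner_loop_eq inner (hvals inner this) acc
  rw [h1, foldl_flatMap_eq]
  rw [seen_foldl_eq _ []]
  have h2 : ∀ m : List String, m.filter (fun y => decide (y ∉ ([] : List String))) = m := by
    intro m
    apply List.filter_eq_self.mpr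
    intro a _
    simp
  rw [h2, List.nil_append]
  unfold firstOcc
  apply List.filterMap_congr
  intro jk _
  simp only [zero_add]

-- ===== VERDICT (by name: the statement is the Claim_ definition above) =====
theorem count_constructs_spec : Claim_equal_count_constructs := by
  intro problems_ids constructs _
  unfold Spec_count_constructs
  exact count_constructs_eq_alt problems_ids constructs
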